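-- pv_equiv track=rewrite | github.com/Liwu-di/PaperCrawlerUtil | src/PaperCrawlerUtil/common_util.py | deleteSpecialCharFromHtmlElement
-- ===== SOURCE A (Python) =====
-- def deleteSpecialCharFromHtmlElement(html: str = "", sep: str = "") -> str:
--     """
--     从html文本中删除标签，如：”<a>b</a>“ -> "b"
--     :param html: html文本
--     :param sep: 在每次去除完一个标签之后，加入的间隔符，如：sep=” “, ”<a>b</a>“ -> " b "
--     :return: 处理完的字符串
--     """
--     names = []
--     flag = True
--     for k in list(html):
--         if k == "<":
--             flag = False
--             continue
--         if k == ">":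
--             flag = True
--             names.append(sep)
--             continue
--         if flag:
--             names.append(k)
--     return "".join(names)
-- ===== SOURCE B (Python) =====
-- def deleteSpecialCharFromHtmlElement(html: str = "", sep: str = "") -> str:
--     return sep.join(part.split("<")[0] for part in html.split(">"))
-- ===== Notes on version B (the rewrite author's own statement) =====
-- stated objective: simpler
-- what changed: Replaces the character-by-character flag state machine with a one-line split/join: split on '>', keep each part's text before its first '<', join with sep.
import Mathlib
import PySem

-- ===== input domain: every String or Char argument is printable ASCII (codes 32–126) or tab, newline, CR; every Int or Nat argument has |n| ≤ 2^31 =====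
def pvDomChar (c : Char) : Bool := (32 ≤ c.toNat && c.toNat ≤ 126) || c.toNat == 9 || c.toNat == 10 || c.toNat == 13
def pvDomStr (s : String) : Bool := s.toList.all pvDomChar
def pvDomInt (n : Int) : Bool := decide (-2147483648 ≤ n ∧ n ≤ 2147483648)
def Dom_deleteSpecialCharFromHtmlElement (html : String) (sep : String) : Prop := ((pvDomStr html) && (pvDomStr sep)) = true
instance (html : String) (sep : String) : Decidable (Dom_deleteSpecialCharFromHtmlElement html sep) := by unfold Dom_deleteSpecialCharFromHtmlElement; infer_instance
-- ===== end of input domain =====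

-- B replaces A's character-by-character flag state machine with a split/join one-liner (objective: simpler); both are total.

-- ===== PORT A =====
-- literal port of A: a flag-driven loop over the characters, collecting pieces in `names`, then "".join(names)
def deleteSpecialCharFromHtmlElement (html : String) (sep : String) : String :=
  let r := html.toList.foldl
    (fun (st : List String × Bool) k =>
      if k = '<' then (st.1, false)
      else if k = '>' then (st.1 ++ [sep], true)
      else if st.2 then (st.1 ++ [String.ofList [k]], st.2)
      else st)
    ([], true)
  PySem.Str.join "" r.1

-- ===== PORT B =====
-- literal port of Source B: sep.join(part.split("<")[0] for part in html.split(">")).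
-- Python's split on the nonempty literal separators is PySem.Chars.splitOn; split never returns an
-- empty list, so `[0]` never raises and is `headD []`.
def deleteSpecialCharFromHtmlElement_alt (html : String) (sep : String) : String :=
  PySem.Str.join sep
    ((PySem.Chars.splitOn html.toList ['>']).map
      (fun part => String.ofList ((PySem.Chars.splitOn part ['<']).headD [])))

-- ===== PRECONDITION & SPEC =====
def Spec_deleteSpecialCharFromHtmlElement (html : String) (sep : String) (out : String) : Prop := out = deleteSpecialCharFromHtmlElement_alt html sep
instance (html : String) (sep : String) (out : String) : Decidable (Spec_deleteSpecialCharFromHtmlElement html sep out) := by unfold Spec_deleteSpecialCharFromHtmlElement; infer_instance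

-- ===== CLAIM (what is proved, stated in full; the proofs are below) =====
def Claim_equal_deleteSpecialCharFromHtmlElement : Prop := ∀ (html : String) (sep : String), Dom_deleteSpecialCharFromHtmlElement html sep → Spec_deleteSpecialCharFromHtmlElement html sep (deleteSpecialCharFromHtmlElement html sep)

-- ===== LEMMAS AND PROOFS =====

-- reference split on a single character (pieces in order, possibly empty)
def pvSp (g : Char) : List Char → List (List Char)
  | [] => [[]]
  | c :: cs =>
    if c = g then [] :: pvSp g cs
    else ((c :: (pvSp g cs).headI) :: (pvSp g cs).tail)

lemma pvSp_ne_nil (g : Char) (cs : List Char) : pvSp g cs ≠ [] := by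
  cases cs <;> simp [pvSp] <;> split <;> simp

lemma pvSp_headI_tail (g : Char) (cs : List Char) :
    (pvSp g cs).headI :: (pvSp g cs).tail = pvSp g cs := by
  cases h : pvSp g cs with
  | nil => exact absurd h (pvSp_ne_nil _ _)
  | cons a l => simp

-- A's state machine as a pure function of the flag and the remaining characters
def pvF (sep : List Char) : Bool → List Char → List Char
  | _, [] => []
  | flag, c :: cs =>
    if c = '<' then pvF sep false cs
    else if c = '>' then sep ++ pvF sep true cs
    else if flag then c :: pvF sep flag cs
    else pvF sep flag cs

-- the fueled splitOn.go computes pvSp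
lemma pvGo_spec (g : Char) : ∀ (fuel : Nat) (l cur : List Char) (acc : List (List Char)),
    l.length < fuel →
    PySem.Chars.splitOn.go [g] fuel l cur acc
      = acc.reverse ++ (cur.reverse ++ (pvSp g l).headI) :: (pvSp g l).tail := by
  intro fuel
  induction fuel with
  | zero => intro l cur acc h; omega
  | succ fuel ih =>
    intro l cur acc h
    cases l with
    | nil => simp [PySem.Chars.splitOn.go, pvSp]
    | cons c rest =>
      by_cases hc : c = g
      · subst hc
        rw [show PySem.Chars.splitOn.go [c] (fuel+1) (c :: rest) cur acc
              = PySem.Chars.splitOn.go [c] fuel rest [] (cur.reverse :: acc) by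
            simp [PySem.Chars.splitOn.go, List.isPrefixOf]]
        rw [ih rest [] (cur.reverse :: acc) (by simpa using Nat.lt_of_succ_lt_succ h)]
        simp [pvSp, pvSp_headI_tail]
      · rw [show PySem.Chars.splitOn.go [g] (fuel+1) (c :: rest) cur acc
              = PySem.Chars.splitOn.go [g] fuel rest (c :: cur) acc by
            simp [PySem.Chars.splitOn.go, List.isPrefixOf, Ne.symm hc]]
        rw [ih rest (c :: cur) acc (by simpa using Nat.lt_of_succ_lt_succ h)]
        simp [pvSp, hc]

lemma splitOn_singleton (g : Char) (cs : List Char) :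
    PySem.Chars.splitOn cs [g] = pvSp g cs := by
  unfold PySem.Chars.splitOn
  rw [pvGo_spec g (cs.length + 1) cs [] [] (by omega)]
  simp [pvSp_headI_tail g cs]

-- `part.split("<")[0]` as a function
def pvTw (p : List Char) : List Char := (pvSp '<' p).headD []

lemma pvTw_nil : pvTw [] = [] := by simp [pvTw, pvSp]

lemma pvTw_lt (p : List Char) : pvTw ('<' :: p) = [] := by simp [pvTw, pvSp]

lemma pvTw_cons (c : Char) (p : List Char) (hc : c ≠ '<') : pvTw (c :: p) = c :: pvTw p := by
  simp only [pvTw, pvSp, if_neg hc]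
  cases h : pvSp '<' p with
  | nil => exact absurd h (pvSp_ne_nil _ _)
  | cons a l => simp

lemma intercalate_nil_sep (l : List (List Char)) : List.intercalate [] l = l.flatten := by
  induction l with
  | nil => simp [List.intercalate]
  | cons a l ih =>
    cases l with
    | nil => simp [List.intercalate]
    | cons b t => simpa [List.intercalate, List.intersperse] using ih

lemma intercalate_cons_head (sep : List Char) (c : Char) (h : List Char) (rest : List (List Char)) :
    List.intercalate sep ((c :: h) :: rest) = c :: List.intercalate sep (h :: rest) := by
  cases rest <;> simp [List.intercalate, List.intersperse]

lemma intercalate_nil_head (sep : List Char) (x : List Char) (t : List (List Char)) :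
    List.intercalate sep ([] :: x :: t) = sep ++ List.intercalate sep (x :: t) := by
  cases t <;> simp [List.intercalate, List.intersperse]

lemma map_pvTw_expand (cs : List Char) :
    (pvSp '>' cs).map pvTw = pvTw (pvSp '>' cs).headI :: ((pvSp '>' cs).tail.map pvTw) := by
  cases h : pvSp '>' cs with
  | nil => exact absurd h (pvSp_ne_nil _ _)
  | cons a l => simp

-- the state machine computes the split/join value
lemma pvF_eq (sep : List Char) (cs : List Char) : ∀ flag : Bool,
    pvF sep flag cs
      = List.intercalate sep
          ((if flag then pvTw (pvSp '>' cs).headI else []) :: ((pvSp '>' cs).tail.map pvTw)) := by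
  induction cs with
  | nil => intro flag; cases flag <;> simp [pvF, pvSp, pvTw_nil, List.intercalate]
  | cons c cs ih =>
    intro flag
    by_cases hlt : c = '<'
    · subst hlt
      rw [show pvF sep flag ('<' :: cs) = pvF sep false cs by cases flag <;> simp [pvF]]
      rw [show pvSp '>' ('<' :: cs) = ('<' :: (pvSp '>' cs).headI) :: (pvSp '>' cs).tail by
        simp [pvSp]]
      rw [ih false]
      cases flag <;> simp [pvTw_lt]
    · by_cases hgt : c = '>'
      · subst hgt
        rw [show pvF sep flag ('>' :: cs) = sep ++ pvF sep true cs by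
          cases flag <;> simp [pvF, hlt]]
        rw [show pvSp '>' ('>' :: cs) = [] :: pvSp '>' cs by simp [pvSp]]
        simp only [List.headI_cons, List.tail_cons]
        rw [ih true]
        have key : List.intercalate sep ([] :: (pvSp '>' cs).map pvTw)
            = sep ++ List.intercalate sep ((pvSp '>' cs).map pvTw) := by
          rw [map_pvTw_expand cs, intercalate_nil_head]
        cases flag with
        | true =>
          simp only [pvTw_nil, reduceIte]
          rw [key, map_pvTw_expand cs]
        | false =>
          simp only [Bool.false_eq_true, if_false]
          rw [key, map_pvTw_expand cs]
          simp
      · rw [show pvSp '>' (c :: cs) = (c :: (pvSp '>' cs).headI) :: (pvSp '>' cs).tail by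
          simp [pvSp, hgt]]
        cases flag with
        | false =>
          rw [show pvF sep false (c :: cs) = pvF sep false cs by simp [pvF, hlt, hgt]]
          simpa using ih false
        | true =>
          rw [show pvF sep true (c :: cs) = c :: pvF sep true cs by simp [pvF, hlt, hgt]]
          rw [ih true]
          simp only [List.headI_cons, List.tail_cons, reduceIte]
          rw [pvTw_cons c _ hlt, intercalate_cons_head]

-- A's foldl loop appends pvF to the already-collected pieces
lemma foldA_spec (sep : String) (cs : List Char) : ∀ (names : List String) (flag : Bool),
    (((cs.foldl
        (fun (st : List String × Bool) k =>
          if k = '<' then (st.1, false)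
          else if k = '>' then (st.1 ++ [sep], true)
          else if st.2 then (st.1 ++ [String.ofList [k]], st.2)
          else st)
        (names, flag)).1).map String.toList).flatten
      = (names.map String.toList).flatten ++ pvF sep.toList flag cs := by
  induction cs with
  | nil => intro names flag; simp [pvF]
  | cons c cs ih =>
    intro names flag
    rw [List.foldl_cons]
    by_cases hlt : c = '<'
    · subst hlt
      rw [show (if ('<' : Char) = '<' then (names, false)
            else if ('<' : Char) = '>' then (names ++ [sep], true)
            else if flag then (names ++ [String.ofList ['<']], flag) else (names, flag))
          = (names, false) by simp]
      rw [ih names false]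
      rw [show pvF sep.toList flag ('<' :: cs) = pvF sep.toList false cs by
        cases flag <;> simp [pvF]]
    · by_cases hgt : c = '>'
      · subst hgt
        rw [show (if ('>' : Char) = '<' then (names, false)
              else if ('>' : Char) = '>' then (names ++ [sep], true)
              else if flag then (names ++ [String.ofList ['>']], flag) else (names, flag))
            = (names ++ [sep], true) by simp]
        rw [ih (names ++ [sep]) true]
        rw [show pvF sep.toList flag ('>' :: cs) = sep.toList ++ pvF sep.toList true cs by
          cases flag <;> simp [pvF]]
        simp
      · cases flag with
        | true =>
          rw [show (if c = '<' then (names, false)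
                else if c = '>' then (names ++ [sep], true)
                else if true then (names ++ [String.ofList [c]], true) else (names, true))
              = (names ++ [String.ofList [c]], true) by simp [hlt, hgt]]
          rw [ih (names ++ [String.ofList [c]]) true]
          rw [show pvF sep.toList true (c :: cs) = c :: pvF sep.toList true cs by
            simp [pvF, hlt, hgt]]
          simp
        | false =>
          rw [show (if c = '<' then (names, false)
                else if c = '>' then (names ++ [sep], true)
                else if false then (names ++ [String.ofList [c]], false) else (names, false))
              = (names, false) by simp [hlt, hgt]]
          rw [ih names false]
          rw [show pvF sep.toList false (c :: cs) = pvF sep.toList false cs by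
            simp [pvF, hlt, hgt]]

-- ===== VERDICT (by name: the statement is the Claim_ definition above) =====
theorem deleteSpecialCharFromHtmlElement_spec : Claim_equal_deleteSpecialCharFromHtmlElement := by
  intro html sep _
  unfold Spec_deleteSpecialCharFromHtmlElement
  rw [← String.toList_inj]
  unfold deleteSpecialCharFromHtmlElement deleteSpecialCharFromHtmlElement_alt
  rw [PySem.Str.toList_join, PySem.Str.toList_join]
  simp only [PySem.Chars.join, String.toList_empty]
  rw [intercalate_nil_sep]
  have hA := foldA_spec sep html.toList [] true
  simp only [List.map_nil, List.flatten_nil, List.nil_append] at hA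
  rw [hA, pvF_eq sep.toList html.toList true]
  rw [splitOn_singleton '>' html.toList]
  simp only [List.map_map]
  have hfun : (String.toList ∘ fun part => String.ofList ((PySem.Chars.splitOn part ['<']).headD []))
      = pvTw := by
    funext part
    simp [pvTw, splitOn_singleton]
  rw [hfun, map_pvTw_expand html.toList]
  simp
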